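/-
  jsmn ON THE MODEL: THE CONTRACTS of the functions of jsmn_d.bin / jsmn_s.bin (proofs/c6), stated in Lean — one `def <Fn>Spec (b : Bin) (n : User.Layout) : Prop`
  per function, so that every function is proved on its own (a caller takes its callees' Specs as hypotheses; Prog/Jsmn/D/Assemble.lean, S/Assemble.lean
  instantiate them bottom-up). Every contract says: THE MACHINE CODE COMPUTES THE PURE MODEL (Json/Jsmn/Model.lean) — same result, same parser state, same tokens — and
  writes nothing but its stack window, the parser struct and the token array.

  WHICH CODE. jsmn.h by Serge Zaitsev (MIT), unmodified (proofs/c6/jsmn.c, sha256 c04533e9181e1e33baceb0f55ac449b05145bb936e8c68cc77dfe0d8277514fb)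
  + proofs/c6/shim.c, gcc 12.2 -Og (flags: proofs/c6/build.sh = those of proofs/c4, c5), linked at 100000H. Two binaries: `binD` = default configuration,
  `binS` = -DJSMN_STRICT -DJSMN_PARENT_LINKS. The contracts are written ONCE, for a `Bin` (configuration, image, entry addresses, stack budgets).

  THE RELATION BETWEEN MEMORY AND THE MODEL'S STATE
    ParserAt μ pa p          the 12 bytes at `pa` are `jsmn_parser {pos, toknext, toksuper}` = p
    TokensAt cfg μ tb ts     the `ts.length` records of `cfg.tokSize` bytes at `tb` are the tokens `ts` (16 bytes: type, start, end, size; 20 with `parent`)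
    CodeAt μ jsA js          the input text (the model's predicate for "these bytes are at this address": X86/Derived/User/Frame.lean)
  `unsigned` fields are the number read; `int` fields are read through `Jsmn.i32` (two's complement).
  A NULL token pointer is `tb = 0` with `toks = none`; otherwise `toks = some ts` and `ts.length = numTokens` (the array really has `num_tokens` entries:
  this is the first thing the C header does not say and the proof needs — see `Env`).
-/
import X86.Derived.Prog.CallFrame
import X86.Derived.Prog.WordFacts
import X86.Derived.Prog.ViewTac
import X86.Derived.User.Frame
import Prog.Jsmn.JsmnDBytes
import Prog.Jsmn.JsmnSBytes
import Json.Jsmn.Encode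
import Json.Jsmn.Inv

namespace X86
namespace J6
open X86.User (CodeAt RegsKept Span FlagsOK Layout toNat_add_ofNat toNat_ofNat_lt' add_ofNat_add)
open Jsmn

set_option linter.unusedVariables false

/-! ### The two binaries -/

/-- One of the two images: its configuration, its bytes, where its functions start, and how many bytes of stack each uses below its return address
(proofs/c6/FUNCTIONS_{d,s}.txt, column "depth"). -/
structure Bin where
  cfg : Jsmn.Config
  image : List UInt8
  alloc : Word
  fill : Word
  prim : Word
  str : Word
  parse : Word
  init : Word
  run : Word
  main : Word
  usePrim : Nat
  useStr : Nat
  useParse : Nat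
  useRun : Nat
  useMain : Nat

/-- jsmn_d.bin: the default configuration. -/
def binD : Bin :=
  { cfg := .default, image := JsmnDBytes.image_bytes, alloc := 0x100040, fill := 0x100076, prim := 0x100086, str := 0x100134, parse := 0x10027a,
    init := 0x100555, run := 0x10056a, main := 0x1005ab, usePrim := 24, useStr := 24, useParse := 88, useRun := 144, useMain := 160 }

/-- jsmn_s.bin: -DJSMN_STRICT -DJSMN_PARENT_LINKS. -/
def binS : Bin :=
  { cfg := .strictLinks, image := JsmnSBytes.image_bytes, alloc := 0x100040, fill := 0x10007e, prim := 0x10008e, str := 0x100154, parse := 0x1002a9,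
    init := 0x10062e, run := 0x100643, main := 0x100684, usePrim := 32, useStr := 32, useParse := 96, useRun := 152, useMain := 168 }


/-! The fields of the two `Bin`s as rewrite rules: `j6_bin` (after `v3_open hp`) replaces `binD.alloc` by `0x100040`, `binD.image` by
`JsmnDBytes.image_bytes`, `binD.cfg.tokSize` by `16`, `binD.image.length` by its value … everywhere in the context and the goal. -/
theorem binD_cfg : binD.cfg = .default := rfl
theorem binD_image : binD.image = JsmnDBytes.image_bytes := rfl
theorem binD_alloc : binD.alloc = 0x100040 := rfl
theorem binD_fill : binD.fill = 0x100076 := rfl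
theorem binD_prim : binD.prim = 0x100086 := rfl
theorem binD_str : binD.str = 0x100134 := rfl
theorem binD_parse : binD.parse = 0x10027a := rfl
theorem binD_init : binD.init = 0x100555 := rfl
theorem binD_run : binD.run = 0x10056a := rfl
theorem binD_main : binD.main = 0x1005ab := rfl
theorem binD_usePrim : binD.usePrim = 24 := rfl
theorem binD_useStr : binD.useStr = 24 := rfl
theorem binD_useParse : binD.useParse = 88 := rfl
theorem binD_useRun : binD.useRun = 144 := rfl
theorem binD_useMain : binD.useMain = 160 := rfl
theorem binS_cfg : binS.cfg = .strictLinks := rfl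
theorem binS_image : binS.image = JsmnSBytes.image_bytes := rfl
theorem binS_alloc : binS.alloc = 0x100040 := rfl
theorem binS_fill : binS.fill = 0x10007e := rfl
theorem binS_prim : binS.prim = 0x10008e := rfl
theorem binS_str : binS.str = 0x100154 := rfl
theorem binS_parse : binS.parse = 0x1002a9 := rfl
theorem binS_init : binS.init = 0x10062e := rfl
theorem binS_run : binS.run = 0x100643 := rfl
theorem binS_main : binS.main = 0x100684 := rfl
theorem binS_usePrim : binS.usePrim = 32 := rfl
theorem binS_useStr : binS.useStr = 32 := rfl
theorem binS_useParse : binS.useParse = 96 := rfl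
theorem binS_useRun : binS.useRun = 152 := rfl
theorem binS_useMain : binS.useMain = 168 := rfl
theorem tokSize_default : Jsmn.Config.default.tokSize = 16 := rfl
theorem tokSize_strictLinks : Jsmn.Config.strictLinks.tokSize = 20 := rfl
theorem strict_default : Jsmn.Config.default.strict = false := rfl
theorem links_default : Jsmn.Config.default.parentLinks = false := rfl
theorem strict_strictLinks : Jsmn.Config.strictLinks.strict = true := rfl
theorem links_strictLinks : Jsmn.Config.strictLinks.parentLinks = true := rfl

/-- Replace the fields of `binD` / `binS` by their values, everywhere. -/
macro "j6_bin" : tactic => `(tactic| simp (implicitDefEqProofs := false) only [binD_cfg, binD_image, binD_alloc, binD_fill, binD_prim, binD_str, binD_parse, binD_init,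
  binD_run, binD_main, binD_usePrim, binD_useStr, binD_useParse, binD_useRun, binD_useMain, binS_cfg, binS_image, binS_alloc, binS_fill, binS_prim, binS_str,
  binS_parse, binS_init, binS_run, binS_main, binS_usePrim, binS_useStr, binS_useParse, binS_useRun, binS_useMain, tokSize_default, tokSize_strictLinks,
  strict_default, links_default, strict_strictLinks, links_strictLinks, JsmnDBytes.image_bytes_length, JsmnSBytes.image_bytes_length] at *)

/-- The call frame of a function of the image `b`: the image in memory at 100000H, RIP at `entry`, the return address on the stack, `use` bytes of stack. -/
abbrev Call (b : Bin) (n : User.Layout) (entry : Word) (use : Nat) (ret : Word) (v0 : User.State) : Prop :=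
  CallPre n 0x100000 b.image entry use ret v0

/-! ### Memory ↔ model -/

/-- A 32-bit memory word holds the `int` `x`. -/
def Holds32 (raw : Nat) (x : Int) : Prop := raw = u32 x ∧ -2147483648 ≤ x ∧ x < 2147483648

/-- `jsmn_parser` at `pa`. -/
structure ParserAt (μ : User.Mem) (pa : Word) (p : Parser) : Prop where
  pos : μ.readLE pa 4 = p.pos
  toknext : μ.readLE (pa + 4) 4 = p.toknext
  toksuper : Holds32 (μ.readLE (pa + 8) 4) p.toksuper

/-- One `jsmntok_t` at `a`. -/
structure TokAt (cfg : Jsmn.Config) (μ : User.Mem) (a : Word) (t : Token) : Prop where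
  type : μ.readLE a 4 = t.type
  start : Holds32 (μ.readLE (a + 4) 4) t.start
  «end» : Holds32 (μ.readLE (a + 8) 4) t.«end»
  size : Holds32 (μ.readLE (a + 12) 4) t.size
  parent : cfg.parentLinks = true → Holds32 (μ.readLE (a + 16) 4) t.parent

/-- The address of `tokens[i]`. -/
def tokAddr (cfg : Jsmn.Config) (tb : Word) (i : Nat) : Word := tb + UInt64.ofNat (cfg.tokSize * i)

/-- The token array at `tb`. -/
def TokensAt (cfg : Jsmn.Config) (μ : User.Mem) (tb : Word) (ts : Tokens) : Prop :=
  ∀ i, (h : i < ts.length) → TokAt cfg μ (tokAddr cfg tb i) ts[i]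

/-- The `tokens` argument: NULL in counting mode, else an array of exactly `numTokens` entries. -/
def ToksArg (cfg : Jsmn.Config) (μ : User.Mem) (tb : Word) (numTokens : Nat) : Option Tokens → Prop
  | none => tb = 0
  | some ts => tb ≠ 0 ∧ ts.length = numTokens ∧ TokensAt cfg μ tb ts

/-- The number of bytes of the token array (0 in counting mode). -/
def toksBytes (cfg : Jsmn.Config) (numTokens : Nat) (toks : Option Tokens) : Nat :=
  match toks with
  | none => 0
  | some _ => cfg.tokSize * numTokens

/-- A data region the function may touch: in the user region (at or above 1 MB, below `n.pages` × 2 MB), off the image, off the function's own stack window. -/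
structure Region (b : Bin) (n : User.Layout) (v0 : User.State) (use : Nat) (a : Word) (len : Nat) : Prop where
  lo : 0x100000 ≤ a.toNat
  hi : a.toNat + len ≤ n.pages * 0x200000
  img : a.toNat + len ≤ 0x100000 ∨ 0x100000 + b.image.length ≤ a.toNat
  stk : a.toNat + len ≤ (v0.reg .rsp).toNat - use ∨ (v0.reg .rsp).toNat + 8 ≤ a.toNat

/-- WHERE THE THREE BUFFERS OF A jsmn CALL ARE: the parser struct (12 bytes at `pa`), the text (`len` bytes at `jsA`), the token array (`tlen` bytes at `tb`):
each a `Region`, and the two that are WRITTEN (parser, tokens) disjoint from each other and from the text. The C header says none of this; the code needs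
all of it (a text that overlaps the token array changes under the parser's feet). -/
structure Env (b : Bin) (n : User.Layout) (v0 : User.State) (use : Nat) (pa jsA : Word) (len : Nat) (tb : Word) (tlen : Nat) : Prop where
  parserR : Region b n v0 use pa 12
  jsR : Region b n v0 use jsA len
  /-- a NULL `tokens` pointer (counting mode) is no region at all: nothing is read or written through it -/
  toksR : tb = 0 ∨ Region b n v0 use tb tlen
  parserJs : pa.toNat + 12 ≤ jsA.toNat ∨ jsA.toNat + len ≤ pa.toNat
  parserToks : pa.toNat + 12 ≤ tb.toNat ∨ tb.toNat + tlen ≤ pa.toNat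
  jsToks : jsA.toNat + len ≤ tb.toNat ∨ tb.toNat + tlen ≤ jsA.toNat

/-- What a jsmn function may write besides its stack window. -/
def dataWins (pa tb : Word) (tlen : Nat) : Windows := [(pa.toNat, pa.toNat + 12), (tb.toNat, tb.toNat + tlen)]

/-- The result register: `eax` holds the `int` `r` (the upper half of rax is zero: every path ends in a 32-bit move). -/
def RetInt (v : User.State) (r : Int) : Prop := v.reg .rax = UInt64.ofNat (u32 r)

/-! ### jsmn_alloc_token, jsmn_fill_token -/

/-- `jsmn_alloc_token(parser = rdi, tokens = rsi, num_tokens = rdx)`: called only with a token array (never NULL). -/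
structure AllocPre (b : Bin) (n : User.Layout) (v0 : User.State) (ret pa tb : Word) (numTokens : Nat) (p : Parser) (ts : Tokens) : Prop where
  call : Call b n b.alloc 0 ret v0
  rdi : v0.reg .rdi = pa
  rsi : v0.reg .rsi = tb
  rdx : v0.reg .rdx = UInt64.ofNat numTokens
  nlt : numTokens < 2 ^ 32
  parser : ParserAt v0.mem pa p
  toks : TokensAt b.cfg v0.mem tb ts
  tlen : ts.length = numTokens
  parserR : Region b n v0 0 pa 12
  toksR : Region b n v0 0 tb (b.cfg.tokSize * numTokens)
  parserToks : pa.toNat + 12 ≤ tb.toNat ∨ tb.toNat + b.cfg.tokSize * numTokens ≤ pa.toNat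

/-- On return: what `Jsmn.allocToken` says. NULL = no change at all; else rax = &tokens[i], the parser and the tokens are the model's. -/
def AllocPost (b : Bin) (v0 : User.State) (ret pa tb : Word) (numTokens : Nat) (p : Parser) (ts : Tokens) (v : User.State) : Prop :=
  CallPost v0 0 (dataWins pa tb (b.cfg.tokSize * numTokens)) ret v ∧
  match allocToken b.cfg p ts numTokens with
  | none => v.reg .rax = 0 ∧ v.mem = v0.mem
  | some (i, p', ts') => v.reg .rax = tokAddr b.cfg tb i ∧ ParserAt v.mem pa p' ∧ TokensAt b.cfg v.mem tb ts'

def AllocSpec (b : Bin) (n : User.Layout) : Prop :=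
  ∀ v0 ret pa tb numTokens p ts, AllocPre b n v0 ret pa tb numTokens p ts → Reach n v0 (AllocPost b v0 ret pa tb numTokens p ts)

/-- `jsmn_fill_token(token = rdi, type = esi, start = edx, end = ecx)`: `token` is `&tokens[i]`. -/
structure FillPre (b : Bin) (n : User.Layout) (v0 : User.State) (ret tb : Word) (ts : Tokens) (i : Nat) (type : Nat) (start «end» : Int) : Prop where
  call : Call b n b.fill 0 ret v0
  rdi : v0.reg .rdi = tokAddr b.cfg tb i
  rsi : Word.low .w32 (v0.reg .rsi) = UInt64.ofNat type
  rdx : Word.low .w32 (v0.reg .rdx) = UInt64.ofNat (u32 start)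
  rcx : Word.low .w32 (v0.reg .rcx) = UInt64.ofNat (u32 «end»)
  tylt : type < 2 ^ 32
  startR : -2147483648 ≤ start ∧ start < 2147483648
  endR : -2147483648 ≤ «end» ∧ «end» < 2147483648
  ilt : i < ts.length
  toks : TokensAt b.cfg v0.mem tb ts
  toksR : Region b n v0 0 tb (b.cfg.tokSize * ts.length)

def FillPost (b : Bin) (v0 : User.State) (ret tb : Word) (ts : Tokens) (i : Nat) (type : Nat) (start «end» : Int) (v : User.State) : Prop :=
  CallPost v0 0 [(tb.toNat, tb.toNat + b.cfg.tokSize * ts.length)] ret v ∧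
  TokensAt b.cfg v.mem tb (ts.set i (fillToken (ts.getD i default) type start «end»))

def FillSpec (b : Bin) (n : User.Layout) : Prop :=
  ∀ v0 ret tb ts i type start «end», FillPre b n v0 ret tb ts i type start «end» → Reach n v0 (FillPost b v0 ret tb ts i type start «end»)

/-! ### jsmn_parse_primitive, jsmn_parse_string, jsmn_parse -/

/-- What the three parsing functions share: `f(parser = rdi, js = rsi, len = rdx, tokens = rcx, num_tokens = r8)` entered at `entry` with `use` bytes of
stack; the text `js` at `jsA`, the parser `p` at `pa`, the token array (or NULL) at `tb`. -/
structure ScanPre (b : Bin) (n : User.Layout) (entry : Word) (use : Nat) (v0 : User.State) (ret pa jsA tb : Word) (js : List UInt8) (numTokens : Nat) (p : Parser)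
    (toks : Option Tokens) : Prop where
  call : Call b n entry use ret v0
  rdi : v0.reg .rdi = pa
  rsi : v0.reg .rsi = jsA
  rdx : v0.reg .rdx = UInt64.ofNat js.length
  rcx : v0.reg .rcx = tb
  nlt : numTokens < 2 ^ 32
  jslt : js.length < 2 ^ 64
  text : CodeAt v0.mem jsA js
  parser : ParserAt v0.mem pa p
  toksArg : ToksArg b.cfg v0.mem tb numTokens toks
  env : Env b n v0 use pa jsA js.length tb (toksBytes b.cfg numTokens toks)

/-- `Region` without the clause `lo` (at or above 1 MB): what is known of the `tokens` argument whether it is NULL or not (a NULL pointer comes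
with 0 bytes). It is all the frame arguments need (the window `[tb, tb + tlen)` is off the image and off the stack). -/
structure RegionW (b : Bin) (n : User.Layout) (v0 : User.State) (use : Nat) (a : Word) (len : Nat) : Prop where
  hi : a.toNat + len ≤ n.pages * 0x200000
  img : a.toNat + len ≤ 0x100000 ∨ 0x100000 + b.image.length ≤ a.toNat
  stk : a.toNat + len ≤ (v0.reg .rsp).toNat - use ∨ (v0.reg .rsp).toNat + 8 ≤ a.toNat

theorem Region.weak {b : Bin} {n : User.Layout} {v0 : User.State} {use : Nat} {a : Word} {len : Nat} (h : Region b n v0 use a len) : RegionW b n v0 use a len :=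
  ⟨h.hi, h.img, h.stk⟩

/-- The token window of a call, NULL or not. -/
theorem ScanPre.toksW {b : Bin} {n : User.Layout} {entry : Word} {use : Nat} {v0 : User.State} {ret pa jsA tb : Word} {js : List UInt8} {numTokens : Nat}
    {p : Parser} {toks : Option Tokens} (h : ScanPre b n entry use v0 ret pa jsA tb js numTokens p toks) :
    RegionW b n v0 use tb (toksBytes b.cfg numTokens toks) := by
  rcases h.env.toksR with h0 | hR
  · cases toks with
    | none => subst h0; exact ⟨by simp [toksBytes], by simp [toksBytes], by simp [toksBytes]⟩
    | some ts => exact absurd h0 h.toksArg.1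
  · exact hR.weak

/-- With a token array (not NULL) the token window is a `Region`. -/
theorem ScanPre.toksRegion {b : Bin} {n : User.Layout} {entry : Word} {use : Nat} {v0 : User.State} {ret pa jsA tb : Word} {js : List UInt8} {numTokens : Nat}
    {p : Parser} {ts : Tokens} (h : ScanPre b n entry use v0 ret pa jsA tb js numTokens p (some ts)) :
    Region b n v0 use tb (b.cfg.tokSize * numTokens) :=
  h.env.toksR.resolve_left h.toksArg.1

/-- On return from any of the three: back at the caller, callee-saved registers kept, nothing written but the stack window, the parser and the token
array; eax = `r`; the parser and the tokens are the model's. -/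
structure ScanPost (b : Bin) (use : Nat) (v0 : User.State) (ret pa tb : Word) (numTokens : Nat) (toks : Option Tokens) (r : Int) (p' : Parser)
    (toks' : Option Tokens) (v : User.State) : Prop where
  ret : CallPost v0 use (dataWins pa tb (toksBytes b.cfg numTokens toks)) ret v
  rax : RetInt v r
  parser : ParserAt v.mem pa p'
  toks : ToksArg b.cfg v.mem tb numTokens toks'

/-- **jsmn_parse_primitive computes `Jsmn.parsePrimitive`** (`num_tokens` is a `size_t` here: all of r8). -/
def PrimSpec (b : Bin) (n : User.Layout) : Prop :=
  ∀ v0 ret pa jsA tb js numTokens p toks fuel r p' toks', ScanPre b n b.prim b.usePrim v0 ret pa jsA tb js numTokens p toks →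
    v0.reg .r8 = UInt64.ofNat numTokens →
    parsePrimitive b.cfg js fuel p toks numTokens = some (r, p', toks') →
    Reach n v0 (ScanPost b b.usePrim v0 ret pa tb numTokens toks r p' toks')

/-- **jsmn_parse_string computes `Jsmn.parseString`.** -/
def StrSpec (b : Bin) (n : User.Layout) : Prop :=
  ∀ v0 ret pa jsA tb js numTokens p toks fuel r p' toks', ScanPre b n b.str b.useStr v0 ret pa jsA tb js numTokens p toks →
    v0.reg .r8 = UInt64.ofNat numTokens →
    parseString b.cfg js fuel p toks numTokens = some (r, p', toks') →
    Reach n v0 (ScanPost b b.useStr v0 ret pa tb numTokens toks r p' toks')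

/-- **jsmn_parse computes `Jsmn.parseFuel`** — for whatever amount of fuel makes the model answer, hence for EVERY text length (for `js.length < 2^32`
the model always answers: Json/Jsmn/Total.lean). `num_tokens` is an `unsigned int`: the low half of r8. The model-side precondition is `Inv`
(Json/Jsmn/Inv.lean): the parser's fields fit the array. -/
def ParseSpec (b : Bin) (n : User.Layout) : Prop :=
  ∀ v0 ret pa jsA tb js numTokens p toks fuel r p' toks', ScanPre b n b.parse b.useParse v0 ret pa jsA tb js numTokens p toks →
    Word.low .w32 (v0.reg .r8) = UInt64.ofNat numTokens →
    Inv b.cfg p toks numTokens →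
    parseFuel b.cfg fuel js p toks numTokens = some (r, p', toks') →
    Reach n v0 (ScanPost b b.useParse v0 ret pa tb numTokens toks r p' toks')

/-! ### jsmn_init, and the shim: jsmn_run, jsmn_main -/

/-- `jsmn_init(parser = rdi)`. -/
structure InitPre (b : Bin) (n : User.Layout) (v0 : User.State) (ret pa : Word) : Prop where
  call : Call b n b.init 0 ret v0
  rdi : v0.reg .rdi = pa
  parserR : Region b n v0 0 pa 12

def InitSpec (b : Bin) (n : User.Layout) : Prop :=
  ∀ v0 ret pa, InitPre b n v0 ret pa →
    Reach n v0 (fun v => CallPost v0 0 [(pa.toNat, pa.toNat + 12)] ret v ∧ ParserAt v.mem pa Parser.init)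

/-- `jsmn_run(js = rdi, len = rsi, tokens = rdx, num_tokens = ecx)`: the parser lives in jsmn_run's own stack frame. -/
structure RunPre (b : Bin) (n : User.Layout) (v0 : User.State) (ret jsA tb : Word) (js : List UInt8) (numTokens : Nat) (toks : Option Tokens) : Prop where
  call : Call b n b.run b.useRun ret v0
  rdi : v0.reg .rdi = jsA
  rsi : v0.reg .rsi = UInt64.ofNat js.length
  rdx : v0.reg .rdx = tb
  rcx : Word.low .w32 (v0.reg .rcx) = UInt64.ofNat numTokens
  jslt : js.length < 2 ^ 64
  text : CodeAt v0.mem jsA js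
  toksArg : ToksArg b.cfg v0.mem tb numTokens toks
  init : Inv.Init toks numTokens
  jsR : Region b n v0 b.useRun jsA js.length
  toksR : tb = 0 ∨ Region b n v0 b.useRun tb (toksBytes b.cfg numTokens toks)
  jsToks : jsA.toNat + js.length ≤ tb.toNat ∨ tb.toNat + toksBytes b.cfg numTokens toks ≤ jsA.toNat

/-- **jsmn_run computes `Jsmn.parseFuel` from `Parser.init`.** -/
def RunSpec (b : Bin) (n : User.Layout) : Prop :=
  ∀ v0 ret jsA tb js numTokens toks fuel r p' toks', RunPre b n v0 ret jsA tb js numTokens toks →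
    parseFuel b.cfg fuel js Parser.init toks numTokens = some (r, p', toks') →
    Reach n v0 (fun v => CallPost v0 b.useRun [(tb.toNat, tb.toNat + toksBytes b.cfg numTokens toks)] ret v ∧ RetInt v r ∧
      ToksArg b.cfg v.mem tb numTokens toks')

/-- `jsmn_main(js = rdi, len = rsi, out = rdx, num_tokens = ecx)`: the token array is `out + 4`, the result goes to `out`. -/
structure MainPre (b : Bin) (n : User.Layout) (v0 : User.State) (ret jsA out : Word) (js : List UInt8) (numTokens : Nat) (ts : Tokens) : Prop where
  call : Call b n b.main b.useMain ret v0
  rdi : v0.reg .rdi = jsA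
  rsi : v0.reg .rsi = UInt64.ofNat js.length
  rdx : v0.reg .rdx = out
  rcx : Word.low .w32 (v0.reg .rcx) = UInt64.ofNat numTokens
  jslt : js.length < 2 ^ 64
  small : numTokens ≤ 2147483648
  text : CodeAt v0.mem jsA js
  tlen : ts.length = numTokens
  toks : TokensAt b.cfg v0.mem (out + 4) ts
  jsR : Region b n v0 b.useMain jsA js.length
  outR : Region b n v0 b.useMain out (4 + b.cfg.tokSize * numTokens)
  jsOut : jsA.toNat + js.length ≤ out.toNat ∨ out.toNat + (4 + b.cfg.tokSize * numTokens) ≤ jsA.toNat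

/-- **jsmn_main leaves `encodeResult r tokens` at `out` and returns its length**, `r` and `tokens` being what the model computes. -/
def MainSpec (b : Bin) (n : User.Layout) : Prop :=
  ∀ v0 ret jsA out js numTokens ts fuel r p' ts', MainPre b n v0 ret jsA out js numTokens ts →
    parseFuel b.cfg fuel js Parser.init (some ts) numTokens = some (r, p', some ts') →
    (0 ≤ r → r ≤ numTokens) →
    Reach n v0 (fun v => CallPost v0 b.useMain [(out.toNat, out.toNat + (4 + b.cfg.tokSize * numTokens))] ret v ∧
      v.reg .rax = UInt64.ofNat (encodeResult b.cfg r ts').length ∧ CodeAt v.mem out (encodeResult b.cfg r ts'))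

end J6
end X86
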